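-- pv_equiv track=rewrite | github.com/pypi-data/pypi-mirror-129 | packages/updrytwist-UpDryTwist/updrytwist_UpDryTwist-0.0.16-py3-none-any.whl/updrytwist/piwigo.py | isDangerousDashes
-- ===== SOURCE A (Python) =====
-- def isDangerousDashes ( picName : str ) -> bool:
--     subsplit = picName.split('-')
--     tooShort = True
--     for subterm in subsplit:
--         if len(subterm) > 2:
--             tooShort = False
--             break
--     return tooShort
-- ===== SOURCE B (Python) =====
-- def isDangerousDashes(picName: str) -> bool:
--     run = 0
--     for ch in picName:
--         if ch == '-':
--             run = 0
--         else:
--             run += 1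
--             if run >= 3:
--                 return False
--     return True
-- ===== Notes on version B (the rewrite author's own statement) =====
-- stated objective: alternative
-- what changed: Replaces the dash-split plus a loop over the resulting pieces by a single character scan that keeps a running length of the current non-dash run and returns False as soon as it reaches 3, never materialising the split.
import Mathlib
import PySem

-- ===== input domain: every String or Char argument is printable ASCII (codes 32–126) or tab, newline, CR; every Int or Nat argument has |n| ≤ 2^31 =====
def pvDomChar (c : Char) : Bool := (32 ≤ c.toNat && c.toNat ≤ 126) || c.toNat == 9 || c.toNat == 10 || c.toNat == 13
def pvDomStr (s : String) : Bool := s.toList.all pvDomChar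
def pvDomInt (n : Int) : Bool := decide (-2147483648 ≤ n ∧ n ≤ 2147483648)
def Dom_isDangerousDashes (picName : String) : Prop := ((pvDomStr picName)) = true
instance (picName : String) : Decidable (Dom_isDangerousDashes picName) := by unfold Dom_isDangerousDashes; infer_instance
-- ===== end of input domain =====

-- B replaces split('-') + a loop over the pieces by a single character scan with a running
-- non-dash run length (alternative decomposition, same O(n) cost).


-- ===== PORT A =====
-- the 'for subterm in subsplit' loop with its early break
def pvALoop : List (List Char) → Bool
  | [] => true
  | t :: ts => if t.length > 2 then false else pvALoop ts

def isDangerousDashes (picName : String) : Bool :=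
  pvALoop (PySem.Chars.splitOn picName.toList "-".toList)

-- ===== PORT B =====
-- character scan keeping the length of the current non-dash run
def pvBLoop : List Char → Nat → Bool
  | [], _ => true
  | c :: cs, run =>
      if c = '-' then pvBLoop cs 0
      else if run + 1 ≥ 3 then false
      else pvBLoop cs (run + 1)

def isDangerousDashes_alt (picName : String) : Bool :=
  pvBLoop picName.toList 0

-- ===== PRECONDITION & SPEC =====
def Spec_isDangerousDashes (picName : String) (out : Bool) : Prop := out = isDangerousDashes_alt picName
instance (picName : String) (out : Bool) : Decidable (Spec_isDangerousDashes picName out) := by unfold Spec_isDangerousDashes; infer_instance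

-- ===== CLAIM (what is proved, stated in full; the proofs are below) =====
def Claim_equal_isDangerousDashes : Prop := ∀ (picName : String), Dom_isDangerousDashes picName → Spec_isDangerousDashes picName (isDangerousDashes picName)

-- ===== LEMMAS AND PROOFS =====

-- proof-side abstraction: the run-scan without B's early break
def pvRun : List Char → Nat → Bool
  | [], n => decide (n ≤ 2)
  | c :: cs, n => if c = '-' then decide (n ≤ 2) && pvRun cs 0 else pvRun cs (n + 1)

lemma pvALoop_eq_all (xs : List (List Char)) :
    pvALoop xs = xs.all (fun t => decide (t.length ≤ 2)) := by
  induction xs with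
  | nil => rfl
  | cons t ts ih =>
      simp only [pvALoop, List.all_cons, ih]
      by_cases h : t.length > 2 <;> simp [h] <;> omega

lemma pvRun_of_ge (l : List Char) : ∀ n, 3 ≤ n → pvRun l n = false := by
  induction l with
  | nil => intro n h; simp [pvRun]; omega
  | cons c cs ih =>
      intro n h
      by_cases hc : c = '-'
      · simp [pvRun, hc]; omega
      · simp [pvRun, hc]; exact ih (n + 1) (by omega)

lemma pvBLoop_eq_pvRun (l : List Char) : ∀ n, n ≤ 2 → pvBLoop l n = pvRun l n := by
  induction l with
  | nil => intro n h; simp [pvBLoop, pvRun]; omega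
  | cons c cs ih =>
      intro n h
      by_cases hc : c = '-'
      · simp [pvBLoop, pvRun, hc, ih 0 (by omega), h]
      · by_cases hr : n + 1 ≥ 3
        · simp [pvBLoop, pvRun, hc, hr, pvRun_of_ge cs (n + 1) hr]
        · simp [pvBLoop, pvRun, hc, hr, ih (n + 1) (by omega)]

lemma pvGo_all (l : List Char) : ∀ (fuel : Nat) (cur : List Char) (acc : List (List Char)),
    l.length < fuel →
    (PySem.Chars.splitOn.go "-".toList fuel l cur acc).all (fun t => decide (t.length ≤ 2))
      = (acc.all (fun t => decide (t.length ≤ 2)) && pvRun l cur.length) := by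
  induction l with
  | nil =>
      intro fuel cur acc h
      match fuel, h with
      | fuel + 1, _ =>
        simp [PySem.Chars.splitOn.go, pvRun, Bool.and_comm]
  | cons c cs ih =>
      intro fuel cur acc h
      match fuel, h with
      | fuel + 1, h =>
        by_cases hc : c = '-'
        · have hpre : ("-".toList).isPrefixOf (c :: cs) = true := by
            simp [hc, List.isPrefixOf]
          simp only [PySem.Chars.splitOn.go, hpre, if_pos]
          have hdrop : List.drop "-".toList.length (c :: cs) = cs := by rfl
          rw [hdrop, ih fuel [] (cur.reverse :: acc) (by simpa using Nat.lt_of_succ_lt_succ h)]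
          simp [pvRun, hc, Bool.and_assoc, Bool.and_comm]
        · have hpre : ("-".toList).isPrefixOf (c :: cs) = false := by
            simp [List.isPrefixOf]; intro h'; exact absurd h'.symm hc
          simp only [PySem.Chars.splitOn.go, hpre, Bool.false_eq_true, if_false]
          rw [ih fuel (c :: cur) acc (Nat.lt_of_succ_lt_succ h)]
          simp [pvRun, hc]

-- ===== VERDICT (by name: the statement is the Claim_ definition above) =====
theorem isDangerousDashes_spec : Claim_equal_isDangerousDashes := by
  intro picName _
  unfold Spec_isDangerousDashes isDangerousDashes isDangerousDashes_alt PySem.Chars.splitOn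
  rw [pvALoop_eq_all, pvGo_all picName.toList (picName.toList.length + 1) [] [] (by omega),
    pvBLoop_eq_pvRun picName.toList 0 (by omega)]
  simp
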